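-- pv_equiv track=rewrite | github.com/sseudes108/Athena | Control/calculadora.py | calcular_acumulo_backlog
-- ===== SOURCE A (Python) =====
-- def calcular_acumulo_backlog(derivacao, capacidade, hora_inicio, hora_fim):
--     acumulo = []
--     total = 0
--
--     for i, (d, c) in enumerate(zip(derivacao, capacidade)):
--         if hora_inicio <= i <= hora_fim:
--             total = d + total - c
--             if total < 0:
--                 total = 0
--             acumulo.append(total)
--         else:
--             total = 0  # reset fora do horário
--             acumulo.append(0)
--     return acumulo
-- ===== SOURCE B (Python) =====
-- def calcular_acumulo_backlog(derivacao, capacidade, hora_inicio, hora_fim):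
--     # Prefix-sum / running-minimum formulation: within the window the clamped
--     # backlog equals prefix[k] - min(0, prefix[0..k]) of the deltas d - c.
--     pairs = list(zip(derivacao, capacidade))
--     n = len(pairs)
--     lo = max(0, hora_inicio)
--     hi = min(hora_fim, n - 1)
--     if lo > hi:
--         return [0] * n
--     prefix = []
--     s = 0
--     for d, c in pairs[lo:hi + 1]:
--         s += d - c
--         prefix.append(s)
--     mins = []
--     m = 0
--     for p in prefix:
--         m = min(m, p)
--         mins.append(m)
--     window = [p - m for p, m in zip(prefix, mins)]
--     return [0] * lo + window + [0] * (n - 1 - hi)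
-- ===== Notes on version B (the rewrite author's own statement) =====
-- stated objective: alternative
-- what changed: B replaces A's clamped running-sum recurrence (reset/branch per index) by the prefix-sum identity: it computes plain prefix sums of d-c over the clamped window, their running minima (seeded with 0), and takes the elementwise difference prefix[k]-min[k], concatenated between zero blocks.
import Mathlib
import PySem

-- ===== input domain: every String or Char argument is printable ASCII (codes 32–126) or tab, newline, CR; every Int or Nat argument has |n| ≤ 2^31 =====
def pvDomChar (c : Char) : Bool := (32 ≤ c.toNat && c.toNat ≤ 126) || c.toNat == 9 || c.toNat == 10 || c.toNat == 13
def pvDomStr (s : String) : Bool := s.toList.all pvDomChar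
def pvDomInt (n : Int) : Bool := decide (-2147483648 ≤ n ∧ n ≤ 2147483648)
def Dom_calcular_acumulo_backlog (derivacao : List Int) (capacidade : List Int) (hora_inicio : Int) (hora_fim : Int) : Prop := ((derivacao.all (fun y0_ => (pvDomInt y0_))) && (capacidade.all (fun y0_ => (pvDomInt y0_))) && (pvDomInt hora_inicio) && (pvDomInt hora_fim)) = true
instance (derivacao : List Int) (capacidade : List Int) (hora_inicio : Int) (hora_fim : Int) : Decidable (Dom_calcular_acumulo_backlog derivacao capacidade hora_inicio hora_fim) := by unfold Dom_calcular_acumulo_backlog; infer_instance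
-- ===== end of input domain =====

-- B replaces A's clamped running-sum recurrence (in-window branch + reset) by the
-- prefix-sum identity: prefix sums of d-c over the clamped window, their running
-- minima seeded with 0, and the elementwise difference, between zero blocks
-- (objective: alternative; same O(n) cost).

-- ===== PORT A =====
def calcular_acumulo_backlog (derivacao : List Int) (capacidade : List Int) (hora_inicio : Int) (hora_fim : Int) : List Int :=
  ((PySem.List.enumerate (derivacao.zip capacidade) 0).foldl
    (fun (st : List Int × Int) p =>
      if hora_inicio ≤ p.1 ∧ p.1 ≤ hora_fim then
        let total := p.2.1 + st.2 - p.2.2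
        let total := if total < 0 then 0 else total
        (st.1 ++ [total], total)
      else
        (st.1 ++ [0], 0))
    ([], 0)).1

-- ===== PORT B =====
def calcular_acumulo_backlog_alt (derivacao : List Int) (capacidade : List Int) (hora_inicio : Int) (hora_fim : Int) : List Int :=
  let pairs := derivacao.zip capacidade
  let n : Int := pairs.length
  let lo := max 0 hora_inicio
  let hi := min hora_fim (n - 1)
  if lo > hi then List.replicate n.toNat 0
  else
    let pr := ((PySem.List.slice pairs (some lo) (some (hi + 1))).foldl
      (fun (st : List Int × Int) p =>
        (st.1 ++ [st.2 + p.1 - p.2], st.2 + p.1 - p.2)) ([], 0)).1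
    let mins := (pr.foldl
      (fun (st : List Int × Int) p =>
        (st.1 ++ [min st.2 p], min st.2 p)) ([], 0)).1
    let window := (pr.zip mins).map (fun q => q.1 - q.2)
    List.replicate lo.toNat 0 ++ window ++ List.replicate (n - 1 - hi).toNat 0

-- ===== PRECONDITION & SPEC =====
def Spec_calcular_acumulo_backlog (derivacao : List Int) (capacidade : List Int) (hora_inicio : Int) (hora_fim : Int) (out : List Int) : Prop := out = calcular_acumulo_backlog_alt derivacao capacidade hora_inicio hora_fim
instance (derivacao : List Int) (capacidade : List Int) (hora_inicio : Int) (hora_fim : Int) (out : List Int) : Decidable (Spec_calcular_acumulo_backlog derivacao capacidade hora_inicio hora_fim out) := by unfold Spec_calcular_acumulo_backlog; infer_instance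

-- ===== CLAIM (what is proved, stated in full; the proofs are below) =====
def Claim_equal_calcular_acumulo_backlog : Prop := ∀ (derivacao : List Int) (capacidade : List Int) (hora_inicio : Int) (hora_fim : Int), Dom_calcular_acumulo_backlog derivacao capacidade hora_inicio hora_fim → Spec_calcular_acumulo_backlog derivacao capacidade hora_inicio hora_fim (calcular_acumulo_backlog derivacao capacidade hora_inicio hora_fim)

-- ===== LEMMAS AND PROOFS =====

-- structural spec of A's loop: result from index i with carried total t
def runA (h0 h1 : Int) : Int → Int → List (Int × Int) → List Int
  | _, _, [] => []
  | i, t, (d, c) :: rest =>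
    if h0 ≤ i ∧ i ≤ h1 then
      let t' := if d + t - c < 0 then 0 else d + t - c
      t' :: runA h0 h1 (i + 1) t' rest
    else
      0 :: runA h0 h1 (i + 1) 0 rest

-- the clamped running fold over the window (mathematical form of A's in-window body)
def fillWin : Int → List (Int × Int) → List Int
  | _, [] => []
  | t, (d, c) :: rest => max (t + d - c) 0 :: fillWin (max (t + d - c) 0) rest

-- structural spec of B's prefix-sum loop
def prefixL : Int → List (Int × Int) → List Int
  | _, [] => []
  | s, (d, c) :: rest => (s + d - c) :: prefixL (s + d - c) rest

-- structural spec of B's running-minimum loop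
def minsL : Int → List Int → List Int
  | _, [] => []
  | m, p :: rest => min m p :: minsL (min m p) rest

theorem foldA_eq_runA (h0 h1 : Int) (ps : List (Int × Int)) :
    ∀ (i t : Int) (acc : List Int),
      ((PySem.List.enumerate ps i).foldl
        (fun (st : List Int × Int) p =>
          if h0 ≤ p.1 ∧ p.1 ≤ h1 then
            let total := p.2.1 + st.2 - p.2.2
            let total := if total < 0 then 0 else total
            (st.1 ++ [total], total)
          else
            (st.1 ++ [0], 0))
        (acc, t)).1 = acc ++ runA h0 h1 i t ps := by
  induction ps with
  | nil => intro i t acc; simp [PySem.List.enumerate_nil, runA]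
  | cons p rest ih =>
    intro i t acc
    obtain ⟨d, c⟩ := p
    rw [PySem.List.enumerate_cons]
    simp only [List.foldl_cons, runA]
    by_cases h : h0 ≤ i ∧ i ≤ h1
    · simp only [h, ih]; simp
    · simp only [h, ih]; simp

theorem foldPre_eq_prefixL (ps : List (Int × Int)) :
    ∀ (s : Int) (acc : List Int),
      (ps.foldl
        (fun (st : List Int × Int) p =>
          (st.1 ++ [st.2 + p.1 - p.2], st.2 + p.1 - p.2)) (acc, s)).1
      = acc ++ prefixL s ps := by
  induction ps with
  | nil => intro s acc; simp [prefixL]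
  | cons p rest ih =>
    intro s acc
    obtain ⟨d, c⟩ := p
    simp only [List.foldl_cons, prefixL, ih]
    simp

theorem foldMin_eq_minsL (xs : List Int) :
    ∀ (m : Int) (acc : List Int),
      (xs.foldl
        (fun (st : List Int × Int) p =>
          (st.1 ++ [min st.2 p], min st.2 p)) (acc, m)).1
      = acc ++ minsL m xs := by
  induction xs with
  | nil => intro m acc; simp [minsL]
  | cons p rest ih =>
    intro m acc
    simp only [List.foldl_cons, minsL, ih]
    simp

-- the key identity: the clamped fold equals prefix sums minus running minima
theorem fillWin_eq_prefix_mins (ps : List (Int × Int)) :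
    ∀ (s m : Int),
      fillWin (s - m) ps
        = ((prefixL s ps).zip (minsL m (prefixL s ps))).map (fun q => q.1 - q.2) := by
  induction ps with
  | nil => intro s m; simp [fillWin, prefixL, minsL]
  | cons p rest ih =>
    intro s m
    obtain ⟨d, c⟩ := p
    simp only [fillWin, prefixL, minsL, List.zip_cons_cons, List.map_cons]
    have h1 : max (s - m + d - c) 0 = (s + d - c) - min m (s + d - c) := by omega
    have h2 : fillWin (max (s - m + d - c) 0) rest
        = ((prefixL (s + d - c) rest).zip
            (minsL (min m (s + d - c)) (prefixL (s + d - c) rest))).map (fun q => q.1 - q.2) := by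
      rw [h1]; exact ih (s + d - c) (min m (s + d - c))
    rw [h1] at h2
    rw [h1, h2]

theorem runA_after (h0 h1 : Int) (ps : List (Int × Int)) :
    ∀ (i t : Int), h1 < i → runA h0 h1 i t ps = List.replicate ps.length 0 := by
  induction ps with
  | nil => intro i t _; simp [runA]
  | cons p rest ih =>
    intro i t h
    obtain ⟨d, c⟩ := p
    rw [runA, if_neg (by omega)]
    simp [List.replicate_succ, ih (i + 1) 0 (by omega)]

theorem runA_in (h0 h1 : Int) (ps : List (Int × Int)) :
    ∀ (i t : Int), h0 ≤ i →
      runA h0 h1 i t ps =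
        fillWin t (ps.take (h1 - i + 1).toNat)
          ++ List.replicate (ps.length - (h1 - i + 1).toNat) 0 := by
  induction ps with
  | nil => intro i t _; simp [runA, fillWin]
  | cons p rest ih =>
    intro i t hi
    obtain ⟨d, c⟩ := p
    by_cases h : i ≤ h1
    · rw [runA, if_pos ⟨hi, h⟩]
      have hw : (h1 - i + 1).toNat = (h1 - (i + 1) + 1).toNat + 1 := by omega
      rw [hw]
      simp only [List.take_succ_cons, fillWin]
      have ht : (if d + t - c < 0 then 0 else d + t - c) = max (t + d - c) 0 := by
        split <;> omega
      rw [ht, ih (i + 1) (max (t + d - c) 0) (by omega)]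
      simp only [List.length_cons]
      have : rest.length + 1 - ((h1 - (i + 1) + 1).toNat + 1)
           = rest.length - (h1 - (i + 1) + 1).toNat := by omega
      rw [this, List.cons_append]
    · rw [runA, if_neg (by omega)]
      have hw : (h1 - i + 1).toNat = 0 := by omega
      rw [hw]
      simp [fillWin, List.replicate_succ, runA_after h0 h1 rest (i + 1) 0 (by omega)]

theorem runA_shift (h0 h1 : Int) (hneg : h0 ≤ 0) (ps : List (Int × Int)) :
    ∀ (i t : Int), 0 ≤ i → runA h0 h1 i t ps = runA 0 h1 i t ps := by
  induction ps with
  | nil => intro i t _; simp [runA]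
  | cons p rest ih =>
    intro i t hi
    obtain ⟨d, c⟩ := p
    rw [runA, runA]
    by_cases h : i ≤ h1
    · rw [if_pos (show h0 ≤ i ∧ i ≤ h1 from ⟨by omega, h⟩),
          if_pos (show (0:Int) ≤ i ∧ i ≤ h1 from ⟨hi, h⟩)]
      exact congrArg (List.cons _) (ih (i + 1) _ (by omega))
    · rw [if_neg (show ¬(h0 ≤ i ∧ i ≤ h1) by omega),
          if_neg (show ¬((0:Int) ≤ i ∧ i ≤ h1) by omega)]
      exact congrArg (List.cons 0) (ih (i + 1) 0 (by omega))

theorem runA_before (h0 h1 : Int) (ps : List (Int × Int)) :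
    ∀ (i : Int), i ≤ h0 →
      runA h0 h1 i 0 ps =
        List.replicate (min (h0 - i).toNat ps.length) 0
          ++ fillWin 0 ((ps.drop (h0 - i).toNat).take (h1 - h0 + 1).toNat)
          ++ List.replicate (ps.length - (h0 - i).toNat - (h1 - h0 + 1).toNat) 0 := by
  induction ps with
  | nil => intro i _; simp [runA, fillWin]
  | cons p rest ih =>
    intro i hi
    obtain ⟨d, c⟩ := p
    by_cases h : i = h0
    · have h0' : (h0 - i).toNat = 0 := by omega
      rw [runA_in h0 h1 ((d, c) :: rest) i 0 (by omega), h0']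
      have hc : (h1 - i + 1).toNat = (h1 - h0 + 1).toNat := by omega
      rw [hc]
      simp
    · have hlt : i < h0 := by omega
      rw [runA, if_neg (by omega)]
      have hm : (h0 - i).toNat = (h0 - (i + 1)).toNat + 1 := by omega
      rw [ih (i + 1) (by omega), hm]
      simp only [List.length_cons, List.drop_succ_cons]
      have h1' : min ((h0 - (i + 1)).toNat + 1) (rest.length + 1)
               = min ((h0 - (i + 1)).toNat) rest.length + 1 := by omega
      have h2' : rest.length + 1 - ((h0 - (i + 1)).toNat + 1) - (h1 - h0 + 1).toNat
               = rest.length - (h0 - (i + 1)).toNat - (h1 - h0 + 1).toNat := by omega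
      rw [h1', h2', List.replicate_succ, List.cons_append, List.cons_append]

-- runA from the start, with the clamped lower bound L = max 0 h0
theorem runA_zero (h0 h1 : Int) (ps : List (Int × Int)) :
    runA h0 h1 0 0 ps =
      List.replicate (min (max 0 h0).toNat ps.length) 0
        ++ fillWin 0 ((ps.drop (max 0 h0).toNat).take (h1 - max 0 h0 + 1).toNat)
        ++ List.replicate (ps.length - (max 0 h0).toNat - (h1 - max 0 h0 + 1).toNat) 0 := by
  by_cases hc : h0 ≤ 0
  · have hL : max 0 h0 = 0 := by omega
    rw [hL, runA_shift h0 h1 hc ps 0 0 le_rfl]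
    have := runA_before 0 h1 ps 0 le_rfl
    simpa using this
  · have hL : max 0 h0 = h0 := by omega
    rw [hL]
    have := runA_before h0 h1 ps 0 (by omega)
    simpa using this

theorem rep_rep (a b c : Nat) (h : a + b = c) :
    List.replicate a (0 : Int) ++ List.replicate b 0 = List.replicate c 0 := by
  subst h; exact (List.replicate_add a b 0).symm

-- ===== VERDICT (by name: the statement is the Claim_ definition above) =====
theorem calcular_acumulo_backlog_spec : Claim_equal_calcular_acumulo_backlog := by
  intro derivacao capacidade h0 h1 _
  unfold Spec_calcular_acumulo_backlog calcular_acumulo_backlog calcular_acumulo_backlog_alt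
  rw [foldA_eq_runA, List.nil_append]
  simp only [runA_zero]
  set ps := derivacao.zip capacidade with hps
  set L := max 0 h0 with hLdef
  have hL0 : 0 ≤ L := le_max_left _ _
  by_cases hwin : L > min h1 ((ps.length : Int) - 1)
  · rw [if_pos hwin]
    rcases (by omega : h1 < L ∨ ps.length ≤ L.toNat) with hα | hα
    · have hw0 : (h1 - L + 1).toNat = 0 := by omega
      rw [hw0]
      simp only [List.take_zero, fillWin, List.append_nil]
      exact rep_rep _ _ _ (by omega)
    · have hdrop : ps.drop L.toNat = [] := List.drop_eq_nil_of_le hα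
      rw [hdrop]
      simp only [List.take_nil, fillWin, List.append_nil]
      exact rep_rep _ _ _ (by omega)
  · rw [if_neg hwin]
    rw [not_lt] at hwin
    rw [foldPre_eq_prefixL, List.nil_append, foldMin_eq_minsL, List.nil_append,
        PySem.List.slice_toNat ps hL0 (by omega)]
    have hid := fillWin_eq_prefix_mins
      ((ps.drop L.toNat).take ((min h1 ((ps.length : Int) - 1) + 1).toNat - L.toNat)) 0 0
    simp only [sub_zero] at hid
    have hm : min L.toNat ps.length = L.toNat := by omega
    have hW : (ps.drop L.toNat).take (h1 - L + 1).toNat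
            = (ps.drop L.toNat).take ((min h1 ((ps.length : Int) - 1) + 1).toNat - L.toNat) := by
      by_cases hβ : h1 ≤ (ps.length : Int) - 1
      · congr 1
        omega
      · have hlen : (ps.drop L.toNat).length = ps.length - L.toNat := List.length_drop ..
        rw [List.take_of_length_le (by omega), List.take_of_length_le (by omega)]
    have hr : ps.length - L.toNat - (h1 - L + 1).toNat
            = ((ps.length : Int) - 1 - min h1 ((ps.length : Int) - 1)).toNat := by omega
    rw [hm, hW, hr, hid]
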